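-- pv_equiv track=rewrite | github.com/MarkusEnglberger/Corr2Cause_PP | scripts/create_c2cp.py | compute_ci_relations
-- ===== SOURCE A (Python) =====
-- from itertools import permutations, combinations, chain
--
-- def powerset(iterable):
--     """Generate all subsets of an iterable."""
--     s = list(iterable)
--     return chain.from_iterable(combinations(s, r) for r in range(len(s) + 1))
--
-- def find_descendants(adj, node):
--     """Find all descendants of a node in a directed graph."""
--     descendants = {node}
--     stack = [node]
--     while stack:
--         curr = stack.pop()
--         for child in adj.get(curr, ()):
--             if child not in descendants:
--                 descendants.add(child)
--                 stack.append(child)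
--     return descendants
--
-- def find_all_paths(adj, x, y, n):
--     """Find all paths between x and y, returning (nodes_on_path, collider_nodes) pairs."""
--     paths = []
--
--     def dfs(curr, visited, colliders, was_incoming):
--         if curr == y:
--             paths.append((visited.copy(), colliders.copy()))
--             return
--         for neighbor in range(1, n + 1):
--             if neighbor in visited:
--                 continue
--             has_out = neighbor in adj.get(curr, set())
--             has_in = curr in adj.get(neighbor, set())
--             if not (has_out or has_in):
--                 continue
--             visited.add(neighbor)
--             if has_out:  # curr -> neighbor
--                 dfs(neighbor, visited, colliders, True)
--             else:  # curr <- neighbor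
--                 if was_incoming:
--                     colliders.add(curr)
--                 dfs(neighbor, visited, colliders, False)
--                 if was_incoming:
--                     colliders.discard(curr)
--             visited.discard(neighbor)
--
--     dfs(x, {x}, set(), False)
--     return paths
--
-- def is_d_separated(paths, descendants, cond_set, x, y):
--     """Check if x and y are d-separated given conditioning set."""
--     if x in cond_set or y in cond_set:
--         return False
--
--     for path_nodes, colliders in paths:
--         # Path is blocked if a non-collider is conditioned on
--         if cond_set & (path_nodes - colliders):
--             continue
--         # Path is blocked if any collider (and descendants) is NOT conditioned on
--         blocked = any(not (cond_set & descendants[c]) for c in colliders)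
--         if not blocked:
--             return False
--     return True
--
-- def compute_ci_relations(edges, n):
--     adj = {}
--     for i, j in edges:
--         if i not in adj:
--             adj[i] = set()
--         adj[i].add(j)
--     descendants = {i: find_descendants(adj, i) for i in range(1, n + 1)}
--     ci_relations = []
--     nodes = list(range(1, n + 1))
--     for x in range(1, n):
--         for y in range(x + 1, n + 1):
--             paths = find_all_paths(adj, x, y, n)
--             for cond_tuple in powerset(nodes):
--                 if is_d_separated(paths, descendants, set(cond_tuple), x, y):
--                     ci_relations.append([[x, y], list(cond_tuple)])
--     return ci_relations
-- ===== SOURCE B (Python) =====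
-- from itertools import combinations, chain
--
-- def powerset(iterable):
--     """Generate all subsets of an iterable."""
--     s = list(iterable)
--     return chain.from_iterable(combinations(s, r) for r in range(len(s) + 1))
--
-- def find_descendants(adj, node):
--     """Find all descendants of a node in a directed graph."""
--     descendants = {node}
--     stack = [node]
--     while stack:
--         curr = stack.pop()
--         for child in adj.get(curr, ()):
--             if child not in descendants:
--                 descendants.add(child)
--                 stack.append(child)
--     return descendants
--
-- def compute_ci_relations(edges, n):
--     adj = {}
--     for i, j in edges:
--         if i not in adj:
--             adj[i] = set()
--         adj[i].add(j)
--     desc = {i: find_descendants(adj, i) for i in range(1, n + 1)}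
--     out_nbrs, in_nbrs = {}, {}
--     for i, j in edges:
--         if 1 <= i <= n and 1 <= j <= n:
--             out_nbrs.setdefault(i, set()).add(j)
--             in_nbrs.setdefault(j, set()).add(i)
--     nodes = list(range(1, n + 1))
--     res = []
--     empty = ()
--     for x in range(1, n):
--         for y in range(x + 1, n + 1):
--             # search for one active (d-connecting) simple path from x to y given z,
--             # pruning a branch as soon as a node's status is decided and found blocked
--             def search(curr, visited, was_in, z):
--                 if curr == y:
--                     return True
--                 leave_ok = curr not in z
--                 out_c = out_nbrs.get(curr, empty)
--                 if leave_ok: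
--                     for nb in out_c:
--                         if nb not in visited:
--                             visited.add(nb)
--                             if search(nb, visited, True, z):
--                                 return True
--                             visited.discard(nb)
--                 if (not z.isdisjoint(desc[curr])) if was_in else leave_ok:
--                     for nb in in_nbrs.get(curr, empty):
--                         if nb not in visited and nb not in out_c:
--                             visited.add(nb)
--                             if search(nb, visited, False, z):
--                                 return True
--                             visited.discard(nb)
--                 return False
--             # conditioning sets containing x or y are never independence statements:
--             # enumerate only the subsets avoiding both (same order as A's surviving ones)
--             others = [u for u in nodes if u != x and u != y]
--             for cond in powerset(others):
--                 if not search(x, {x}, False, set(cond)):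
--                     res.append([[x, y], list(cond)])
--     return res
-- ===== Notes on version B (the rewrite author's own statement) =====
-- stated objective: alternative
-- what changed: A enumerates every simple path between each pair once and then, for each of the 2^n conditioning sets, re-scans the whole path list testing blockedness; B never materialises paths: it enumerates only the conditioning sets avoiding the pair and decides each query by one depth-first search for a single active path, pruning a branch as soon as a node's collider status is decided and found blocked.
import Mathlib
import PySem

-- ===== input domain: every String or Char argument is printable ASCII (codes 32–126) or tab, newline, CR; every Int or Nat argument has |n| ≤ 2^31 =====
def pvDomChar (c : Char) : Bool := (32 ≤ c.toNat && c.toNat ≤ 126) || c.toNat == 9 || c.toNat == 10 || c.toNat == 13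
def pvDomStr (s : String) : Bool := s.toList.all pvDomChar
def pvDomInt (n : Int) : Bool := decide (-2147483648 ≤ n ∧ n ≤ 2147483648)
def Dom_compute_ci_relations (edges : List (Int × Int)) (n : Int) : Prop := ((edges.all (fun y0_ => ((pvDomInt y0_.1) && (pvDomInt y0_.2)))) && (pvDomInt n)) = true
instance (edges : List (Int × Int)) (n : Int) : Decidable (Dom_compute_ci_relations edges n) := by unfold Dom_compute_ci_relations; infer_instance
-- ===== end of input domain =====

-- B replaces A's enumerate-all-paths-then-filter d-separation test by a pruned depth-first
-- search for one active path per (pair, conditioning set) query, over conditioning sets that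
-- avoid the pair (the only ones A ever emits); a different algorithm of comparable cost.

-- ===== PORT A =====
-- helpers shared by both ports: both Pythons build `adj`, `descendants` and `powerset(nodes)`
-- with identical code, so they are defined once here.

-- adj = {}; for i, j in edges: if i not in adj: adj[i] = set(); adj[i].add(j)
def buildAdj (edges : List (Int × Int)) : PySem.Dict Int (PySem.Set Int) :=
  edges.foldl (fun d p =>
    let d := if d.contains p.1 then d else d.insert p.1 []
    d.modify p.1 [] (fun s => PySem.Set.add s p.2)) PySem.Dict.empty

-- the while-stack loop of find_descendants; one fuel unit per pop, stack top at the head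
-- (the result is consumed only as a set, so the pop order cannot affect any output).
def findDescGo (adj : PySem.Dict Int (PySem.Set Int)) : Nat → List Int → PySem.Set Int → PySem.Set Int
  | 0, _, desc => desc
  | _ + 1, [], desc => desc
  | fuel + 1, curr :: stack, desc =>
    let st := (adj.getD curr []).foldl
      (fun (p : PySem.Set Int × List Int) child =>
        if child ∈ p.1 then p else (PySem.Set.add p.1 child, child :: p.2)) (desc, stack)
    findDescGo adj fuel st.2 st.1

-- find_descendants(adj, node); each node is pushed at most once, so edges.length + 1 pops suffice
def findDescendantsL (adj : PySem.Dict Int (PySem.Set Int)) (node : Int) (fuel : Nat) : PySem.Set Int :=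
  findDescGo adj fuel [node] (PySem.Set.ofList [node])

-- descendants = {i: find_descendants(adj, i) for i in range(1, n + 1)}
def buildDesc (adj : PySem.Dict Int (PySem.Set Int)) (n : Int) (fuel : Nat) : PySem.Dict Int (PySem.Set Int) :=
  (PySem.List.pyRange 1 (n + 1) 1).foldl (fun d i => d.insert i (findDescendantsL adj i fuel)) PySem.Dict.empty

-- powerset(nodes): chain.from_iterable(combinations(s, r) for r in range(len(s) + 1))
def powersetL (s : List Int) : List (List Int) :=
  (List.range (s.length + 1)).flatMap (fun r => PySem.List.combinations s r)

-- the recursive dfs of find_all_paths; the mutable visited/colliders add-then-discard pattern is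
-- ported by passing the extended sets only to the recursive call; fuel = one unit per call
def dfsA (adj : PySem.Dict Int (PySem.Set Int)) (y n : Int) :
    Nat → Int → PySem.Set Int → PySem.Set Int → Bool → List (PySem.Set Int × PySem.Set Int)
  | 0, _, _, _, _ => []
  | fuel + 1, curr, visited, colliders, wasIn =>
    if curr = y then [(visited, colliders)]
    else
      (PySem.List.pyRange 1 (n + 1) 1).foldl (fun acc nb =>
        if nb ∈ visited then acc
        else
          let hasOut := nb ∈ adj.getD curr []
          let hasIn := curr ∈ adj.getD nb []
          if ¬(hasOut ∨ hasIn) then acc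
          else if hasOut then acc ++ dfsA adj y n fuel nb (PySem.Set.add visited nb) colliders true
          else acc ++ dfsA adj y n fuel nb (PySem.Set.add visited nb)
                 (if wasIn then PySem.Set.add colliders curr else colliders) false) []

-- is_d_separated(paths, descendants, cond_set, x, y)
def isDsep (paths : List (PySem.Set Int × PySem.Set Int)) (desc : PySem.Dict Int (PySem.Set Int))
    (z : PySem.Set Int) (x y : Int) : Bool :=
  if x ∈ z ∨ y ∈ z then false
  else paths.all (fun pc =>
    !(PySem.Set.inter z (PySem.Set.diff pc.1 pc.2)).isEmpty
    || pc.2.any (fun c => (PySem.Set.inter z (desc.getD c [])).isEmpty))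

def compute_ci_relations (edges : List (Int × Int)) (n : Int) : List (List (List Int)) :=
  let adj := buildAdj edges
  let desc := buildDesc adj n (edges.length + 1)
  let nodes := PySem.List.pyRange 1 (n + 1) 1
  (PySem.List.pyRange 1 n 1).foldl (fun acc x =>
    (PySem.List.pyRange (x + 1) (n + 1) 1).foldl (fun acc y =>
      let paths := dfsA adj y n (n.toNat + 1) x (PySem.Set.ofList [x]) (PySem.Set.ofList []) false
      (powersetL nodes).foldl (fun acc cond =>
        if isDsep paths desc (PySem.Set.ofList cond) x y then acc ++ [[[x, y], cond]] else acc)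
        acc) acc) []

-- ===== PORT B =====
-- out_nbrs / in_nbrs: one pass over edges, keeping only edges inside 1..n
def buildOutIn (edges : List (Int × Int)) (n : Int) :
    PySem.Dict Int (PySem.Set Int) × PySem.Dict Int (PySem.Set Int) :=
  edges.foldl (fun p e =>
    if 1 ≤ e.1 ∧ e.1 ≤ n ∧ 1 ≤ e.2 ∧ e.2 ≤ n then
      (p.1.modify e.1 [] (fun s => PySem.Set.add s e.2),
       p.2.modify e.2 [] (fun s => PySem.Set.add s e.1))
    else p) (PySem.Dict.empty, PySem.Dict.empty)

-- the pruned active-path search; fuel = one unit per call (Python backtracks a mutable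
-- visited set; passing the extended set to the recursive call is the same computation)
def searchB (outN inN desc : PySem.Dict Int (PySem.Set Int)) (y : Int) (z : PySem.Set Int) :
    Nat → Int → PySem.Set Int → Bool → Bool
  | 0, _, _, _ => false
  | fuel + 1, curr, visited, wasIn =>
    if curr = y then true
    else
      let leaveOk := !decide (curr ∈ z)
      let outC := outN.getD curr []
      let b1 := leaveOk && outC.any (fun nb =>
        !decide (nb ∈ visited) && searchB outN inN desc y z fuel nb (PySem.Set.add visited nb) true)
      let openOk := if wasIn then !(PySem.Set.isdisjoint z (desc.getD curr [])) else leaveOk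
      let b2 := openOk && (inN.getD curr []).any (fun nb =>
        (!decide (nb ∈ visited) && !decide (nb ∈ outC)) &&
          searchB outN inN desc y z fuel nb (PySem.Set.add visited nb) false)
      b1 || b2

def compute_ci_relations_alt (edges : List (Int × Int)) (n : Int) : List (List (List Int)) :=
  let adj := buildAdj edges
  let desc := buildDesc adj n (edges.length + 1)
  let oi := buildOutIn edges n
  let nodes := PySem.List.pyRange 1 (n + 1) 1
  (PySem.List.pyRange 1 n 1).foldl (fun acc x =>
    (PySem.List.pyRange (x + 1) (n + 1) 1).foldl (fun acc y =>
      let others := nodes.filter (fun u => !(decide (u = x)) && !(decide (u = y)))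
      (powersetL others).foldl (fun acc cond =>
        if searchB oi.1 oi.2 desc y (PySem.Set.ofList cond) (n.toNat + 1) x
            (PySem.Set.ofList [x]) false then acc
        else acc ++ [[[x, y], cond]]) acc) acc) []

-- ===== PRECONDITION & SPEC =====
def Spec_compute_ci_relations (edges : List (Int × Int)) (n : Int) (out : List (List (List Int))) : Prop := out = compute_ci_relations_alt edges n
instance (edges : List (Int × Int)) (n : Int) (out : List (List (List Int))) : Decidable (Spec_compute_ci_relations edges n out) := by unfold Spec_compute_ci_relations; infer_instance

-- ===== CLAIM (what is proved, stated in full; the proofs are below) =====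
def Claim_equal_compute_ci_relations : Prop := ∀ (edges : List (Int × Int)) (n : Int), Dom_compute_ci_relations edges n → Spec_compute_ci_relations edges n (compute_ci_relations edges n)

-- ===== LEMMAS AND PROOFS =====

-- set-intersection truthiness: `z & s` is falsy iff no element of z lies in s
lemma inter_isEmpty_iff (s t : PySem.Set Int) :
    (PySem.Set.inter s t).isEmpty = true ↔ ∀ a ∈ s, a ∉ t := by
  rw [List.isEmpty_iff, List.eq_nil_iff_forall_not_mem]
  constructor
  · intro h a ha hat; exact h a (by rw [PySem.Set.mem_inter]; exact ⟨ha, hat⟩)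
  · intro h a ha; rw [PySem.Set.mem_inter] at ha; exact h a ha.1 ha.2

lemma getD_buildAdj_step (d : PySem.Dict Int (PySem.Set Int)) (p : Int × Int) (u : Int) :
    ((if d.contains p.1 then d else d.insert p.1 []).modify p.1 [] (fun s => PySem.Set.add s p.2)).getD u []
      = if u = p.1 then PySem.Set.add (d.getD p.1 []) p.2 else d.getD u [] := by
  by_cases hc : d.contains p.1 <;> by_cases hu : u = p.1 <;>
    simp [hc, hu, PySem.Dict.getD_modify, PySem.Dict.getD_insert,
      PySem.Dict.getD_of_not_contains]

-- `adj` holds exactly the edge relation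
lemma mem_getD_buildAdj (edges : List (Int × Int)) (u v : Int) :
    v ∈ (buildAdj edges).getD u [] ↔ (u, v) ∈ edges := by
  have aux : ∀ (l : List (Int × Int)) (d : PySem.Dict Int (PySem.Set Int)),
      (v ∈ (l.foldl (fun d p =>
        let d := if d.contains p.1 then d else d.insert p.1 []
        d.modify p.1 [] (fun s => PySem.Set.add s p.2)) d).getD u [] ↔
        v ∈ d.getD u [] ∨ (u, v) ∈ l) := by
    intro l
    induction l with
    | nil => simp
    | cons p rest ih =>
      intro d
      rw [List.foldl_cons, ih]
      show v ∈ ((if d.contains p.1 then d else d.insert p.1 []).modify p.1 []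
        (fun s => PySem.Set.add s p.2)).getD u [] ∨ (u, v) ∈ rest ↔ _
      rw [getD_buildAdj_step]
      by_cases hu : u = p.1
      · subst hu
        rw [if_pos rfl]
        simp only [PySem.Set.mem_add, List.mem_cons, Prod.ext_iff]
        aesop
      · rw [if_neg hu]
        simp only [List.mem_cons, Prod.ext_iff]
        aesop
  have := aux edges PySem.Dict.empty
  simpa [buildAdj] using this

lemma getD_modify_add_step (d : PySem.Dict Int (PySem.Set Int)) (k v u : Int) :
    (d.modify k [] (fun s => PySem.Set.add s v)).getD u []
      = if u = k then PySem.Set.add (d.getD k []) v else d.getD u [] := by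
  by_cases hu : u = k <;> simp [hu, PySem.Dict.getD_modify]

-- `out_nbrs` / `in_nbrs` hold exactly the edge relation restricted to nodes 1..n
lemma mem_getD_buildOutIn (edges : List (Int × Int)) (n : Int) (u v : Int) :
    (v ∈ (buildOutIn edges n).1.getD u [] ↔
      ((u, v) ∈ edges ∧ 1 ≤ u ∧ u ≤ n ∧ 1 ≤ v ∧ v ≤ n)) ∧
    (v ∈ (buildOutIn edges n).2.getD u [] ↔
      ((v, u) ∈ edges ∧ 1 ≤ v ∧ v ≤ n ∧ 1 ≤ u ∧ u ≤ n)) := by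
  have aux : ∀ (l : List (Int × Int)) (d1 d2 : PySem.Dict Int (PySem.Set Int)),
      (v ∈ (l.foldl (fun (p : PySem.Dict Int (PySem.Set Int) × PySem.Dict Int (PySem.Set Int)) e =>
          if 1 ≤ e.1 ∧ e.1 ≤ n ∧ 1 ≤ e.2 ∧ e.2 ≤ n then
            (p.1.modify e.1 [] (fun s => PySem.Set.add s e.2),
             p.2.modify e.2 [] (fun s => PySem.Set.add s e.1))
          else p) (d1, d2)).1.getD u [] ↔
        v ∈ d1.getD u [] ∨ ((u, v) ∈ l ∧ 1 ≤ u ∧ u ≤ n ∧ 1 ≤ v ∧ v ≤ n)) ∧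
      (v ∈ (l.foldl (fun (p : PySem.Dict Int (PySem.Set Int) × PySem.Dict Int (PySem.Set Int)) e =>
          if 1 ≤ e.1 ∧ e.1 ≤ n ∧ 1 ≤ e.2 ∧ e.2 ≤ n then
            (p.1.modify e.1 [] (fun s => PySem.Set.add s e.2),
             p.2.modify e.2 [] (fun s => PySem.Set.add s e.1))
          else p) (d1, d2)).2.getD u [] ↔
        v ∈ d2.getD u [] ∨ ((v, u) ∈ l ∧ 1 ≤ v ∧ v ≤ n ∧ 1 ≤ u ∧ u ≤ n)) := by
    intro l
    induction l with
    | nil => simp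
    | cons e rest ih =>
      intro d1 d2
      by_cases he : 1 ≤ e.1 ∧ e.1 ≤ n ∧ 1 ≤ e.2 ∧ e.2 ≤ n
      · rw [List.foldl_cons, if_pos he]
        obtain ⟨h1, h2, h3, h4⟩ := he
        constructor
        · rw [(ih _ _).1, getD_modify_add_step]
          by_cases hu : u = e.1
          · subst hu; rw [if_pos rfl]
            simp only [PySem.Set.mem_add, List.mem_cons, Prod.ext_iff]
            aesop
          · rw [if_neg hu]
            simp only [List.mem_cons, Prod.ext_iff]
            aesop
        · rw [(ih _ _).2, getD_modify_add_step]
          by_cases hu : u = e.2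
          · subst hu; rw [if_pos rfl]
            simp only [PySem.Set.mem_add, List.mem_cons, Prod.ext_iff]
            aesop
          · rw [if_neg hu]
            simp only [List.mem_cons, Prod.ext_iff]
            aesop
      · rw [List.foldl_cons, if_neg he]
        constructor
        · rw [(ih _ _).1]
          simp only [List.mem_cons, Prod.ext_iff]
          constructor
          · rintro (h | h); exacts [Or.inl h, Or.inr ⟨Or.inr h.1, h.2⟩]
          · rintro (h | ⟨⟨rfl, rfl⟩ | h, hb⟩)
            exacts [Or.inl h, absurd ⟨hb.1, hb.2.1, hb.2.2.1, hb.2.2.2⟩ he, Or.inr ⟨h, hb⟩]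
        · rw [(ih _ _).2]
          simp only [List.mem_cons, Prod.ext_iff]
          constructor
          · rintro (h | h); exacts [Or.inl h, Or.inr ⟨Or.inr h.1, h.2⟩]
          · rintro (h | ⟨⟨rfl, rfl⟩ | h, hb⟩)
            exacts [Or.inl h, absurd ⟨hb.1, hb.2.1, hb.2.2.1, hb.2.2.2⟩ he, Or.inr ⟨h, hb⟩]
  have := aux edges PySem.Dict.empty PySem.Dict.empty
  simpa [buildOutIn] using this

-- what A's dfs loop contributes for one candidate neighbour
def chunkA (adj : PySem.Dict Int (PySem.Set Int)) (y n : Int) (fuel : Nat) (curr : Int)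
    (vis cl : PySem.Set Int) (w : Bool) (nb : Int) : List (PySem.Set Int × PySem.Set Int) :=
  if nb ∈ vis then []
  else if ¬(nb ∈ adj.getD curr [] ∨ curr ∈ adj.getD nb []) then []
  else if nb ∈ adj.getD curr [] then dfsA adj y n fuel nb (PySem.Set.add vis nb) cl true
  else dfsA adj y n fuel nb (PySem.Set.add vis nb) (if w then PySem.Set.add cl curr else cl) false

lemma dfsA_succ_ne (adj : PySem.Dict Int (PySem.Set Int)) (y n : Int) (fuel : Nat)
    (curr : Int) (vis cl : PySem.Set Int) (w : Bool) (h : curr ≠ y) :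
    dfsA adj y n (fuel + 1) curr vis cl w
      = (PySem.List.pyRange 1 (n + 1) 1).flatMap (chunkA adj y n fuel curr vis cl w) := by
  rw [dfsA, if_neg h]
  have hfun : (fun (acc : List (PySem.Set Int × PySem.Set Int)) nb =>
      if nb ∈ vis then acc
      else
        let hasOut := nb ∈ adj.getD curr []
        let hasIn := curr ∈ adj.getD nb []
        if ¬(hasOut ∨ hasIn) then acc
        else if hasOut then acc ++ dfsA adj y n fuel nb (PySem.Set.add vis nb) cl true
        else acc ++ dfsA adj y n fuel nb (PySem.Set.add vis nb)
               (if w then PySem.Set.add cl curr else cl) false)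
      = fun acc nb => acc ++ chunkA adj y n fuel curr vis cl w nb := by
    funext acc nb
    simp only [chunkA]
    split_ifs <;> simp
  rw [hfun, PySem.List.foldl_append_eq_flatMap, List.nil_append]

lemma mem_dfsA_succ_ne (adj : PySem.Dict Int (PySem.Set Int)) (y n : Int) (fuel : Nat)
    (curr : Int) (vis cl : PySem.Set Int) (w : Bool) (h : curr ≠ y)
    (pc : PySem.Set Int × PySem.Set Int) :
    pc ∈ dfsA adj y n (fuel + 1) curr vis cl w ↔
      ∃ nb ∈ PySem.List.pyRange 1 (n + 1) 1, pc ∈ chunkA adj y n fuel curr vis cl w nb := by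
  rw [dfsA_succ_ne adj y n fuel curr vis cl w h, List.mem_flatMap]

-- invariants of every (path, collider) pair A's dfs returns
lemma dfsA_struct (adj : PySem.Dict Int (PySem.Set Int)) (y n : Int) :
    ∀ (fuel : Nat) (curr : Int) (vis cl : PySem.Set Int) (w : Bool)
      (pc : PySem.Set Int × PySem.Set Int), pc ∈ dfsA adj y n fuel curr vis cl w →
      (∀ a ∈ vis, a ∈ pc.1) ∧ (∀ a ∈ cl, a ∈ pc.2) ∧
      (∀ a, a ∈ pc.2 → a ∈ vis → a ≠ curr → a ∈ cl) := by
  intro fuel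
  induction fuel with
  | zero => intro curr vis cl w pc h; simp [dfsA] at h
  | succ f ih =>
    intro curr vis cl w pc h
    by_cases hy : curr = y
    · rw [dfsA, if_pos hy, List.mem_singleton] at h
      subst h
      exact ⟨fun a ha => ha, fun a ha => ha, fun a ha _ _ => ha⟩
    · rw [mem_dfsA_succ_ne adj y n f curr vis cl w hy] at h
      obtain ⟨nb, _, hpc⟩ := h
      rw [chunkA] at hpc
      split_ifs at hpc with h1 h2 h3 hw
      · exact absurd hpc (by simp)
      · obtain ⟨s1, s2, s3⟩ := ih nb (PySem.Set.add vis nb) cl true pc hpc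
        refine ⟨fun a ha => s1 a (by rw [PySem.Set.mem_add]; exact Or.inl ha), s2,
          fun a ha hav hac => ?_⟩
        exact s3 a ha (by rw [PySem.Set.mem_add]; exact Or.inl hav) (fun e => h1 (e ▸ hav))
      · obtain ⟨s1, s2, s3⟩ := ih nb (PySem.Set.add vis nb) (PySem.Set.add cl curr) false pc hpc
        refine ⟨fun a ha => s1 a (by rw [PySem.Set.mem_add]; exact Or.inl ha),
          fun a ha => s2 a (by rw [PySem.Set.mem_add]; exact Or.inl ha),
          fun a ha hav hac => ?_⟩
        have := s3 a ha (by rw [PySem.Set.mem_add]; exact Or.inl hav) (fun e => h1 (e ▸ hav))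
        rw [PySem.Set.mem_add] at this
        exact this.resolve_right hac
      · obtain ⟨s1, s2, s3⟩ := ih nb (PySem.Set.add vis nb) cl false pc hpc
        refine ⟨fun a ha => s1 a (by rw [PySem.Set.mem_add]; exact Or.inl ha), s2,
          fun a ha hav hac => ?_⟩
        exact s3 a ha (by rw [PySem.Set.mem_add]; exact Or.inl hav) (fun e => h1 (e ▸ hav))
      · exact absurd hpc (by simp)

-- a (path, colliders) pair of A is d-connecting ("active") given z
def ActiveP (desc : PySem.Dict Int (PySem.Set Int)) (z : PySem.Set Int)
    (pc : PySem.Set Int × PySem.Set Int) : Prop :=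
  (∀ a ∈ z, a ∈ pc.1 → a ∈ pc.2) ∧ (∀ c ∈ pc.2, ∃ a ∈ z, a ∈ desc.getD c [])

lemma searchB_succ_ne (outN inN desc : PySem.Dict Int (PySem.Set Int)) (y : Int)
    (z : PySem.Set Int) (f : Nat) (curr : Int) (vis : PySem.Set Int) (w : Bool)
    (h : curr ≠ y) :
    searchB outN inN desc y z (f + 1) curr vis w =
      (((!decide (curr ∈ z)) && (outN.getD curr []).any (fun nb =>
          !decide (nb ∈ vis) && searchB outN inN desc y z f nb (PySem.Set.add vis nb) true)) ||
       ((if w then !(PySem.Set.isdisjoint z (desc.getD curr [])) else !decide (curr ∈ z)) &&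
        (inN.getD curr []).any (fun nb =>
          (!decide (nb ∈ vis) && !decide (nb ∈ outN.getD curr [])) &&
            searchB outN inN desc y z f nb (PySem.Set.add vis nb) false))) := by
  rw [searchB, if_neg h]

lemma not_isdisjoint_iff (s t : PySem.Set Int) :
    ((!(PySem.Set.isdisjoint s t)) = true) ↔ ∃ a ∈ s, a ∈ t := by
  rw [Bool.not_eq_true', Bool.eq_false_iff, Ne, PySem.Set.isdisjoint_iff]
  push Not
  simp

lemma inter_not_isEmpty_iff (s t : PySem.Set Int) :
    ((!(PySem.Set.inter s t).isEmpty) = true) ↔ ∃ a ∈ s, a ∈ t := by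
  rw [Bool.not_eq_true', Bool.eq_false_iff, Ne, inter_isEmpty_iff]
  push Not
  simp

-- the heart of the equivalence: B's pruned search finds an active extension exactly when
-- one of the paths A enumerates from the same intermediate state is active
lemma search_iff (edges : List (Int × Int)) (n : Int) (desc : PySem.Dict Int (PySem.Set Int))
    (y : Int) (z : PySem.Set Int) (hyz : y ∉ z) :
    ∀ (fuel : Nat) (curr : Int) (vis cl : PySem.Set Int) (w : Bool),
      1 ≤ curr → curr ≤ n → curr ∈ vis →
      (∀ a ∈ cl, a ∈ vis ∧ a ≠ curr) →
      (curr = y ∨ y ∉ vis) →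
      (∀ a ∈ z, a ∈ vis → a ≠ curr → a ∈ cl) →
      (∀ c ∈ cl, ∃ a ∈ z, a ∈ desc.getD c []) →
      ((searchB (buildOutIn edges n).1 (buildOutIn edges n).2 desc y z fuel curr vis w = true) ↔
        ∃ pc ∈ dfsA (buildAdj edges) y n fuel curr vis cl w, ActiveP desc z pc) := by
  intro fuel
  induction fuel with
  | zero => intro curr vis cl w _ _ _ _ _ _ _; simp [searchB, dfsA]
  | succ f ih =>
    intro curr vis cl w hc1 hc2 hcv hclv hyv hzv hcld
    by_cases hy : curr = y
    · rw [searchB, if_pos hy, dfsA, if_pos hy]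
      simp only [List.mem_singleton, true_iff]
      refine ⟨(vis, cl), rfl, ?_, hcld⟩
      intro a haz hav
      by_cases hac : a = curr
      · exact absurd (hac.trans hy ▸ haz) hyz
      · exact hzv a haz hav hac
    · have houtm := fun u v => (mem_getD_buildOutIn edges n u v).1
      have hinm := fun u v => (mem_getD_buildOutIn edges n u v).2
      have hadjm := mem_getD_buildAdj edges
      have hynv : y ∉ vis := hyv.resolve_left hy
      have hR : (∃ pc ∈ dfsA (buildAdj edges) y n (f + 1) curr vis cl w, ActiveP desc z pc) ↔
          ∃ nb ∈ PySem.List.pyRange 1 (n + 1) 1,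
            ∃ pc ∈ chunkA (buildAdj edges) y n f curr vis cl w nb, ActiveP desc z pc := by
        rw [dfsA_succ_ne _ _ _ _ _ _ _ _ hy]
        constructor
        · rintro ⟨pc, hpc, hact⟩
          obtain ⟨nb, h1, h2⟩ := List.mem_flatMap.mp hpc
          exact ⟨nb, h1, pc, h2, hact⟩
        · rintro ⟨nb, h1, pc, h2, hact⟩
          exact ⟨pc, List.mem_flatMap.mpr ⟨nb, h1, h2⟩, hact⟩
      rw [hR, searchB_succ_ne _ _ _ _ _ _ _ _ _ hy, Bool.or_eq_true, Bool.and_eq_true,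
        Bool.and_eq_true, List.any_eq_true, List.any_eq_true]
      simp only [Bool.and_eq_true, Bool.not_eq_true', decide_eq_false_iff_not]
      -- invariants that hold at every child state
      have hchild_vis : ∀ nb : Int, nb ∉ vis → nb ∈ PySem.Set.add vis nb := by
        intro nb _; rw [PySem.Set.mem_add]; exact Or.inr rfl
      have hchild_y : ∀ nb : Int, nb = y ∨ y ∉ PySem.Set.add vis nb := by
        intro nb
        by_cases hnb : nb = y
        · exact Or.inl hnb
        · refine Or.inr ?_
          rw [PySem.Set.mem_add]
          rintro (h | h)
          exacts [hynv h, hnb h.symm]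
      have hchild_cl : ∀ nb : Int, nb ∉ vis → ∀ a ∈ cl, a ∈ PySem.Set.add vis nb ∧ a ≠ nb := by
        intro nb hnb a ha
        obtain ⟨h1, _⟩ := hclv a ha
        exact ⟨by rw [PySem.Set.mem_add]; exact Or.inl h1, fun e => hnb (e ▸ h1)⟩
      have hchild_z : ∀ nb : Int, nb ∉ vis → curr ∉ z →
          ∀ a ∈ z, a ∈ PySem.Set.add vis nb → a ≠ nb → a ∈ cl := by
        intro nb hnb hcz a haz hav hanb
        rw [PySem.Set.mem_add] at hav
        rcases hav with hav | hav
        · by_cases hac : a = curr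
          · exact absurd (hac ▸ haz) hcz
          · exact hzv a haz hav hac
        · exact absurd hav hanb
      -- collider-child invariants (w = true, in-edge: curr joins the colliders)
      have hchild_clv' : ∀ nb : Int, nb ∉ vis →
          ∀ a ∈ PySem.Set.add cl curr, a ∈ PySem.Set.add vis nb ∧ a ≠ nb := by
        intro nb hnb a ha
        rw [PySem.Set.mem_add] at ha
        rcases ha with ha | rfl
        · exact hchild_cl nb hnb a ha
        · exact ⟨by rw [PySem.Set.mem_add]; exact Or.inl hcv, fun e => hnb (e ▸ hcv)⟩
      have hchild_z' : ∀ nb : Int, nb ∉ vis →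
          ∀ a ∈ z, a ∈ PySem.Set.add vis nb → a ≠ nb → a ∈ PySem.Set.add cl curr := by
        intro nb hnb a haz hav hanb
        rw [PySem.Set.mem_add] at hav ⊢
        rcases hav with hav | hav
        · by_cases hac : a = curr
          · exact Or.inr hac
          · exact Or.inl (hzv a haz hav hac)
        · exact absurd hav hanb
      have hchild_cld' : (∃ a ∈ z, a ∈ desc.getD curr []) →
          ∀ c ∈ PySem.Set.add cl curr, ∃ a ∈ z, a ∈ desc.getD c [] := by
        intro hopen c hc
        rw [PySem.Set.mem_add] at hc
        rcases hc with hc | rfl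
        · exact hcld c hc
        · exact hopen
      constructor
      · rintro (⟨hcz, nb, hnbo, hnbv, hs⟩ | ⟨hopen, nb, hnbi, ⟨hnbv, hnbno⟩, hs⟩)
        · -- B took an out-edge curr → nb
          obtain ⟨hedge, _, _, hnb1, hnb2⟩ := (houtm curr nb).mp hnbo
          have hih := (ih nb (PySem.Set.add vis nb) cl true hnb1 hnb2
            (hchild_vis nb hnbv) (hchild_cl nb hnbv) (hchild_y nb)
            (hchild_z nb hnbv hcz) hcld).mp hs
          refine ⟨nb, PySem.List.mem_pyRange_one.mpr ⟨hnb1, by omega⟩, ?_⟩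
          rw [chunkA, if_neg hnbv, if_neg (by rw [hadjm curr nb]; tauto),
            if_pos ((hadjm curr nb).mpr hedge)]
          exact hih
        · -- B took an in-edge nb → curr
          obtain ⟨hedge, hnb1, hnb2, _, _⟩ := (hinm curr nb).mp hnbi
          have hnoout : nb ∉ (buildAdj edges).getD curr [] := by
            rw [hadjm curr nb]
            intro he
            exact hnbno ((houtm curr nb).mpr ⟨he, hc1, hc2, hnb1, hnb2⟩)
          have hchunk : chunkA (buildAdj edges) y n f curr vis cl w nb
              = dfsA (buildAdj edges) y n f nb (PySem.Set.add vis nb)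
                  (if w then PySem.Set.add cl curr else cl) false := by
            rw [chunkA, if_neg hnbv, if_neg (by rw [hadjm nb curr]; tauto), if_neg hnoout]
          refine ⟨nb, PySem.List.mem_pyRange_one.mpr ⟨hnb1, by omega⟩, ?_⟩
          rw [hchunk]
          cases w with
          | false =>
            rw [if_neg (by simp)] at hopen ⊢
            have hcz : curr ∉ z := by simpa using hopen
            exact (ih nb (PySem.Set.add vis nb) cl false hnb1 hnb2
              (hchild_vis nb hnbv) (hchild_cl nb hnbv) (hchild_y nb)
              (hchild_z nb hnbv hcz) hcld).mp hs
          | true =>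
            rw [if_pos rfl] at hopen ⊢
            have hop : ∃ a ∈ z, a ∈ desc.getD curr [] := (not_isdisjoint_iff _ _).mp hopen
            exact (ih nb (PySem.Set.add vis nb) (PySem.Set.add cl curr) false hnb1 hnb2
              (hchild_vis nb hnbv) (hchild_clv' nb hnbv) (hchild_y nb)
              (hchild_z' nb hnbv) (hchild_cld' hop)).mp hs
      · rintro ⟨nb, hnbr, pc, hpc, hact⟩
        obtain ⟨hnb1, hnb2'⟩ := PySem.List.mem_pyRange_one.mp hnbr
        have hnb2 : nb ≤ n := by omega
        rw [chunkA] at hpc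
        split_ifs at hpc with h1 h2 h3 hw
        · exact absurd hpc (by simp)
        · -- out-edge case
          have hedge : (curr, nb) ∈ edges := (hadjm curr nb).mp h3
          have hcz : curr ∉ z := by
            intro hcz
            obtain ⟨s1, _, s3⟩ := dfsA_struct (buildAdj edges) y n f nb
              (PySem.Set.add vis nb) cl true pc hpc
            have hc_p1 : curr ∈ pc.1 := s1 curr (by rw [PySem.Set.mem_add]; exact Or.inl hcv)
            have hc_p2 : curr ∈ pc.2 := hact.1 curr hcz hc_p1
            have : curr ∈ cl := s3 curr hc_p2
              (by rw [PySem.Set.mem_add]; exact Or.inl hcv) (fun e => h1 (e ▸ hcv))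
            exact (hclv curr this).2 rfl
          refine Or.inl ⟨hcz, nb, (houtm curr nb).mpr ⟨hedge, hc1, hc2, hnb1, hnb2⟩, h1, ?_⟩
          exact (ih nb (PySem.Set.add vis nb) cl true hnb1 hnb2
            (hchild_vis nb h1) (hchild_cl nb h1) (hchild_y nb)
            (hchild_z nb h1 hcz) hcld).mpr ⟨pc, hpc, hact⟩
        · -- in-edge case, was_incoming: curr is a collider here
          have hedge : (nb, curr) ∈ edges := by
            rcases not_not.mp (by simpa using h2) with h | h
            · exact absurd h h3
            · exact (hadjm nb curr).mp h
          have hnoout : nb ∉ (buildOutIn edges n).1.getD curr [] := by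
            rw [houtm curr nb]
            rintro ⟨he, _⟩
            exact h3 ((hadjm curr nb).mpr he)
          obtain ⟨_, s2, _⟩ := dfsA_struct (buildAdj edges) y n f nb
            (PySem.Set.add vis nb) (PySem.Set.add cl curr) false pc hpc
          have hc_p2 : curr ∈ pc.2 := s2 curr (by rw [PySem.Set.mem_add]; exact Or.inr rfl)
          obtain ⟨a, ha1, ha2⟩ := hact.2 curr hc_p2
          have hop : ∃ a ∈ z, a ∈ desc.getD curr [] := ⟨a, ha1, ha2⟩
          refine Or.inr ⟨?_, nb, (hinm curr nb).mpr ⟨hedge, hnb1, hnb2, hc1, hc2⟩,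
            ⟨h1, hnoout⟩, ?_⟩
          · rw [if_pos hw, not_isdisjoint_iff]
            exact ⟨a, ha1, ha2⟩
          · exact (ih nb (PySem.Set.add vis nb) (PySem.Set.add cl curr) false hnb1 hnb2
              (hchild_vis nb h1) (hchild_clv' nb h1) (hchild_y nb)
              (hchild_z' nb h1) (hchild_cld' hop)).mpr ⟨pc, hpc, hact⟩
        · -- in-edge case, not was_incoming: curr is a non-collider here
          have hedge : (nb, curr) ∈ edges := by
            rcases not_not.mp (by simpa using h2) with h | h
            · exact absurd h h3
            · exact (hadjm nb curr).mp h
          have hnoout : nb ∉ (buildOutIn edges n).1.getD curr [] := by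
            rw [houtm curr nb]
            rintro ⟨he, _⟩
            exact h3 ((hadjm curr nb).mpr he)
          have hcz : curr ∉ z := by
            intro hcz
            obtain ⟨s1, _, s3⟩ := dfsA_struct (buildAdj edges) y n f nb
              (PySem.Set.add vis nb) cl false pc hpc
            have hc_p1 : curr ∈ pc.1 := s1 curr (by rw [PySem.Set.mem_add]; exact Or.inl hcv)
            have hc_p2 : curr ∈ pc.2 := hact.1 curr hcz hc_p1
            have : curr ∈ cl := s3 curr hc_p2
              (by rw [PySem.Set.mem_add]; exact Or.inl hcv) (fun e => h1 (e ▸ hcv))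
            exact (hclv curr this).2 rfl
          refine Or.inr ⟨?_, nb, (hinm curr nb).mpr ⟨hedge, hnb1, hnb2, hc1, hc2⟩,
            ⟨h1, hnoout⟩, ?_⟩
          · rw [if_neg hw]
            simpa using hcz
          · exact (ih nb (PySem.Set.add vis nb) cl false hnb1 hnb2
              (hchild_vis nb h1) (hchild_cl nb h1) (hchild_y nb)
              (hchild_z nb h1 hcz) hcld).mpr ⟨pc, hpc, hact⟩
        · exact absurd hpc (by simp)

-- A's per-path blocking test is exactly the negation of ActiveP
lemma blocked_iff (desc : PySem.Dict Int (PySem.Set Int)) (z : PySem.Set Int)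
    (pc : PySem.Set Int × PySem.Set Int) :
    ((!(PySem.Set.inter z (PySem.Set.diff pc.1 pc.2)).isEmpty) ||
      pc.2.any (fun c => (PySem.Set.inter z (desc.getD c [])).isEmpty)) = true ↔
      ¬ ActiveP desc z pc := by
  rw [Bool.or_eq_true, inter_not_isEmpty_iff, List.any_eq_true, ActiveP, not_and_or]
  constructor
  · rintro (⟨a, haz, had⟩ | ⟨c, hc, hce⟩)
    · rw [PySem.Set.mem_diff] at had
      exact Or.inl (fun h => had.2 (h a haz had.1))
    · refine Or.inr (fun h => ?_)
      obtain ⟨a, ha1, ha2⟩ := h c hc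
      exact (inter_isEmpty_iff _ _).mp hce a ha1 ha2
  · rintro (h | h)
    · push Not at h
      obtain ⟨a, haz, h1, h2⟩ := h
      exact Or.inl ⟨a, haz, by rw [PySem.Set.mem_diff]; exact ⟨h1, h2⟩⟩
    · push Not at h
      obtain ⟨c, hc, h2⟩ := h
      refine Or.inr ⟨c, hc, (inter_isEmpty_iff _ _).mpr fun a ha1 ha2 => h2 a ha1 ha2⟩

-- filtering a powerset by an element-wise predicate is the powerset of the filtered list
lemma combinations_filter (q : Int → Bool) :
    ∀ (s : List Int) (r : Nat),
      (PySem.List.combinations s r).filter (fun c => c.all q)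
        = PySem.List.combinations (s.filter q) r := by
  intro s
  induction s with
  | nil =>
    intro r
    cases r <;>
      simp [PySem.List.combinations_zero, PySem.List.combinations_nil_succ]
  | cons a t ih =>
    intro r
    cases r with
    | zero => simp [PySem.List.combinations_zero]
    | succ r =>
      rw [PySem.List.combinations_cons_succ, List.filter_append, List.filter_map]
      by_cases hq : q a = true
      · have hcons : (a :: t).filter q = a :: t.filter q := by simp [hq]
        rw [hcons, PySem.List.combinations_cons_succ, ← ih r, ← ih (r + 1)]
        congr 1
        congr 1
        apply List.filter_congr
        intro c _
        simp [hq]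
      · have hcons : (a :: t).filter q = t.filter q := by simp [hq]
        have hnil : (PySem.List.combinations t r).filter ((fun c => c.all q) ∘ (a :: ·)) = [] := by
          apply List.filter_eq_nil_iff.mpr
          intro c _
          simp [hq]
        rw [hcons, hnil, ← ih (r + 1), List.map_nil, List.nil_append]

lemma filter_flatMap_list (l : List Nat) (f : Nat → List (List Int)) (p : List Int → Bool) :
    (l.flatMap f).filter p = l.flatMap (fun a => (f a).filter p) := by
  induction l with
  | nil => simp
  | cons a t ih => simp [List.flatMap_cons, List.filter_append, ih]

lemma flatMap_range_combinations (t : List Int) (m : Nat) (h : t.length ≤ m) :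
    (List.range (m + 1)).flatMap (PySem.List.combinations t) = powersetL t := by
  have hm : m + 1 = (t.length + 1) + (m - t.length) := by omega
  rw [powersetL, hm, List.range_add, List.flatMap_append]
  have hnil : ((List.range (m - t.length)).map fun i => t.length + 1 + i).flatMap
      (PySem.List.combinations t) = [] := by
    apply List.flatMap_eq_nil_iff.mpr
    intro r hr
    obtain ⟨i, _, rfl⟩ := List.mem_map.mp hr
    apply PySem.List.combinations_eq_nil_of_length_lt
    omega
  rw [hnil, List.append_nil]

lemma powersetL_filter (q : Int → Bool) (s : List Int) :
    (powersetL s).filter (fun c => c.all q) = powersetL (s.filter q) := by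
  rw [powersetL, filter_flatMap_list]
  have hcongr : (List.range (s.length + 1)).flatMap
      (fun r => (PySem.List.combinations s r).filter (fun c => c.all q))
      = (List.range (s.length + 1)).flatMap (fun r => PySem.List.combinations (s.filter q) r) := by
    exact List.flatMap_congr fun r _ => combinations_filter q s r
  rw [hcongr]
  exact flatMap_range_combinations (s.filter q) s.length (List.length_filter_le q s)

lemma mem_powersetL_sublist (s c : List Int) (h : c ∈ powersetL s) : c.Sublist s := by
  rw [powersetL, List.mem_flatMap] at h
  obtain ⟨r, _, hc⟩ := h
  exact ((PySem.List.mem_combinations_iff s r c).mp hc).1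

-- ===== VERDICT (by name: the statement is the Claim_ definition above) =====
theorem compute_ci_relations_spec : Claim_equal_compute_ci_relations := by
  intro edges n _
  show compute_ci_relations edges n = compute_ci_relations_alt edges n
  simp only [compute_ci_relations, compute_ci_relations_alt]
  apply PySem.List.foldl_congr_mem
  intro acc x hx
  apply PySem.List.foldl_congr_mem
  intro acc2 y hy
  obtain ⟨hx1, hx2⟩ := PySem.List.mem_pyRange_one.mp hx
  obtain ⟨hy1, hy2⟩ := PySem.List.mem_pyRange_one.mp hy
  -- step 1: A's loop only emits for conditioning sets avoiding x and y
  have h1 : ∀ (acc3 : List (List (List Int))) (cond : List Int),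
      cond ∈ powersetL (PySem.List.pyRange 1 (n + 1) 1) →
      (if isDsep (dfsA (buildAdj edges) y n (n.toNat + 1) x (PySem.Set.ofList [x])
            (PySem.Set.ofList []) false) (buildDesc (buildAdj edges) n (edges.length + 1))
            (PySem.Set.ofList cond) x y = true
        then acc3 ++ [[[x, y], cond]] else acc3)
      = (if (cond.all fun u => !(decide (u = x)) && !(decide (u = y))) = true
          then (if (dfsA (buildAdj edges) y n (n.toNat + 1) x (PySem.Set.ofList [x])
              (PySem.Set.ofList []) false).all (fun pc =>
                !(PySem.Set.inter (PySem.Set.ofList cond) (PySem.Set.diff pc.1 pc.2)).isEmpty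
                || pc.2.any (fun c => (PySem.Set.inter (PySem.Set.ofList cond)
                    ((buildDesc (buildAdj edges) n (edges.length + 1)).getD c [])).isEmpty)) = true
            then acc3 ++ [[[x, y], cond]] else acc3)
          else acc3) := by
    intro acc3 cond _
    by_cases hc : (cond.all fun u => !(decide (u = x)) && !(decide (u = y))) = true
    · rw [if_pos hc]
      have hxy : ¬(x ∈ PySem.Set.ofList cond ∨ y ∈ PySem.Set.ofList cond) := by
        rw [List.all_eq_true] at hc
        rintro (h | h) <;> rw [PySem.Set.mem_ofList] at h <;>
          · have := hc _ h
            simp at this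
      rw [isDsep, if_neg hxy]
    · have hxy : x ∈ PySem.Set.ofList cond ∨ y ∈ PySem.Set.ofList cond := by
        rw [List.all_eq_true] at hc
        push Not at hc
        obtain ⟨u, hu, hq⟩ := hc
        have hux : u = x ∨ u = y := by
          by_contra hcon
          push Not at hcon
          simp [hcon.1, hcon.2] at hq
        rcases hux with rfl | rfl
        · exact Or.inl (by rw [PySem.Set.mem_ofList]; exact hu)
        · exact Or.inr (by rw [PySem.Set.mem_ofList]; exact hu)
      rw [if_neg hc, isDsep, if_pos hxy]
      simp
  have e1 : (powersetL (PySem.List.pyRange 1 (n + 1) 1)).foldl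
      (fun acc3 cond =>
        if isDsep (dfsA (buildAdj edges) y n (n.toNat + 1) x (PySem.Set.ofList [x])
            (PySem.Set.ofList []) false) (buildDesc (buildAdj edges) n (edges.length + 1))
            (PySem.Set.ofList cond) x y = true
          then acc3 ++ [[[x, y], cond]] else acc3) acc2
      = (powersetL (PySem.List.pyRange 1 (n + 1) 1)).foldl
      (fun acc3 cond =>
        if (cond.all fun u => !(decide (u = x)) && !(decide (u = y))) = true
          then (if (dfsA (buildAdj edges) y n (n.toNat + 1) x (PySem.Set.ofList [x])
              (PySem.Set.ofList []) false).all (fun pc =>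
                !(PySem.Set.inter (PySem.Set.ofList cond) (PySem.Set.diff pc.1 pc.2)).isEmpty
                || pc.2.any (fun c => (PySem.Set.inter (PySem.Set.ofList cond)
                    ((buildDesc (buildAdj edges) n (edges.length + 1)).getD c [])).isEmpty)) = true
            then acc3 ++ [[[x, y], cond]] else acc3)
          else acc3) acc2 := PySem.List.foldl_congr_mem _ _ _ _ h1
  have e2 : (powersetL (PySem.List.pyRange 1 (n + 1) 1)).foldl
      (fun acc3 cond =>
        if (cond.all fun u => !(decide (u = x)) && !(decide (u = y))) = true
          then (if (dfsA (buildAdj edges) y n (n.toNat + 1) x (PySem.Set.ofList [x])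
              (PySem.Set.ofList []) false).all (fun pc =>
                !(PySem.Set.inter (PySem.Set.ofList cond) (PySem.Set.diff pc.1 pc.2)).isEmpty
                || pc.2.any (fun c => (PySem.Set.inter (PySem.Set.ofList cond)
                    ((buildDesc (buildAdj edges) n (edges.length + 1)).getD c [])).isEmpty)) = true
            then acc3 ++ [[[x, y], cond]] else acc3)
          else acc3) acc2
      = ((powersetL (PySem.List.pyRange 1 (n + 1) 1)).filter
          (fun cond => cond.all fun u => !(decide (u = x)) && !(decide (u = y)))).foldl
      (fun acc3 cond =>
        if (dfsA (buildAdj edges) y n (n.toNat + 1) x (PySem.Set.ofList [x])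
              (PySem.Set.ofList []) false).all (fun pc =>
                !(PySem.Set.inter (PySem.Set.ofList cond) (PySem.Set.diff pc.1 pc.2)).isEmpty
                || pc.2.any (fun c => (PySem.Set.inter (PySem.Set.ofList cond)
                    ((buildDesc (buildAdj edges) n (edges.length + 1)).getD c [])).isEmpty)) = true
          then acc3 ++ [[[x, y], cond]] else acc3) acc2 := by
    apply PySem.List.foldl_if_eq_foldl_filter
  rw [e1, e2, powersetL_filter (fun u => !(decide (u = x)) && !(decide (u = y)))
      (PySem.List.pyRange 1 (n + 1) 1)]
  -- step 2: on those sets A's remaining test is exactly the complement of B's search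
  apply PySem.List.foldl_congr_mem
  intro acc3 cond hcond
  have hsub := mem_powersetL_sublist _ _ hcond
  have hmem : ∀ u ∈ cond, u ≠ x ∧ u ≠ y := by
    intro u hu
    have := List.mem_filter.mp (hsub.subset hu)
    simpa using this.2
  have hxc : x ∉ PySem.Set.ofList cond := by
    rw [PySem.Set.mem_ofList]
    intro h
    exact (hmem x h).1 rfl
  have hyc : y ∉ PySem.Set.ofList cond := by
    rw [PySem.Set.mem_ofList]
    intro h
    exact (hmem y h).2 rfl
  have hiff := search_iff edges n (buildDesc (buildAdj edges) n (edges.length + 1)) y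
    (PySem.Set.ofList cond) hyc (n.toNat + 1) x (PySem.Set.ofList [x])
    (PySem.Set.ofList []) false hx1 (by omega)
    (by rw [PySem.Set.mem_ofList]; exact List.mem_singleton.mpr rfl)
    (by intro a ha; simp at ha)
    (Or.inr (by rw [PySem.Set.mem_ofList, List.mem_singleton]; omega))
    (by
      intro a _ h1 h2
      rw [PySem.Set.mem_ofList, List.mem_singleton] at h1
      exact absurd h1 h2)
    (by intro c hc; simp at hc)
  cases hs : searchB (buildOutIn edges n).1 (buildOutIn edges n).2
      (buildDesc (buildAdj edges) n (edges.length + 1)) y (PySem.Set.ofList cond)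
      (n.toNat + 1) x (PySem.Set.ofList [x]) false with
  | false =>
    have hall : ∀ pc ∈ dfsA (buildAdj edges) y n (n.toNat + 1) x (PySem.Set.ofList [x])
        (PySem.Set.ofList []) false,
        ¬ ActiveP (buildDesc (buildAdj edges) n (edges.length + 1)) (PySem.Set.ofList cond) pc := by
      intro pc hpc hact
      have := hiff.mpr ⟨pc, hpc, hact⟩
      rw [hs] at this
      exact Bool.false_ne_true this
    rw [if_pos (List.all_eq_true.mpr fun pc hpc =>
      (blocked_iff (buildDesc (buildAdj edges) n (edges.length + 1))
        (PySem.Set.ofList cond) pc).mpr (hall pc hpc))]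
    simp
  | true =>
    obtain ⟨pc, hpc, hact⟩ := hiff.mp hs
    have hfalse : ((dfsA (buildAdj edges) y n (n.toNat + 1) x (PySem.Set.ofList [x])
        (PySem.Set.ofList []) false).all (fun pc =>
          !(PySem.Set.inter (PySem.Set.ofList cond) (PySem.Set.diff pc.1 pc.2)).isEmpty
          || pc.2.any (fun c => (PySem.Set.inter (PySem.Set.ofList cond)
              ((buildDesc (buildAdj edges) n (edges.length + 1)).getD c [])).isEmpty))) = false := by
      rw [Bool.eq_false_iff, Ne, List.all_eq_true]
      intro h
      exact (blocked_iff _ _ pc).mp (h pc hpc) hact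
    rw [hfalse]
    simp
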